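-- pv_equiv track=rewrite | github.com/dappalumbo91/FSOT-2.0-code | fsot_multimodal_ai_system.py | _extract_topics
-- ===== SOURCE A (Python) =====
-- from typing import Dict, List, Any, Optional, Tuple, Union
--
-- def _extract_topics(words: List[str]) -> List[str]:
--     """Extract topics from text"""
--     topic_keywords = {
--         "technology": ["ai", "computer", "software", "digital", "system", "algorithm"],
--         "science": ["research", "study", "analysis", "experiment", "data", "theory"],
--         "emotion": ["feel", "emotion", "happy", "sad", "angry", "love", "hate"],
--         "communication": ["speak", "talk", "say", "tell", "communicate", "discuss"]
--     }
--
--     detected_topics = []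
--     word_set = set(word.lower() for word in words)
--
--     for topic, keywords in topic_keywords.items():
--         if any(keyword in word_set for keyword in keywords):
--             detected_topics.append(topic)
--
--     return detected_topics
-- ===== SOURCE B (Python) =====
-- from typing import List
--
-- # Flat keyword -> topic lookup table (inverted index), written directly.
-- KEYWORD_TOPIC = {
--     "ai": "technology", "computer": "technology", "software": "technology",
--     "digital": "technology", "system": "technology", "algorithm": "technology",
--     "research": "science", "study": "science", "analysis": "science",
--     "experiment": "science", "data": "science", "theory": "science",
--     "feel": "emotion", "emotion": "emotion", "happy": "emotion",
--     "sad": "emotion", "angry": "emotion", "love": "emotion", "hate": "emotion",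
--     "speak": "communication", "talk": "communication", "say": "communication",
--     "tell": "communication", "communicate": "communication", "discuss": "communication",
-- }
--
-- TOPIC_ORDER = ["technology", "science", "emotion", "communication"]
--
-- def _extract_topics(words: List[str]) -> List[str]:
--     """Extract topics from text: one pass over the words through the inverted index."""
--     detected = set()
--     for word in words:
--         topic = KEYWORD_TOPIC.get(word.lower())
--         if topic is not None:
--             detected.add(topic)
--     return [t for t in TOPIC_ORDER if t in detected]
-- ===== Notes on version B (the rewrite author's own statement) =====
-- stated objective: alternative
-- what changed: Replaces the per-topic scan of keyword lists against a word set by a flat inverted keyword->topic table, one pass over the words collecting hit topics in a set, and a filter of the fixed topic order.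
import Mathlib
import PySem

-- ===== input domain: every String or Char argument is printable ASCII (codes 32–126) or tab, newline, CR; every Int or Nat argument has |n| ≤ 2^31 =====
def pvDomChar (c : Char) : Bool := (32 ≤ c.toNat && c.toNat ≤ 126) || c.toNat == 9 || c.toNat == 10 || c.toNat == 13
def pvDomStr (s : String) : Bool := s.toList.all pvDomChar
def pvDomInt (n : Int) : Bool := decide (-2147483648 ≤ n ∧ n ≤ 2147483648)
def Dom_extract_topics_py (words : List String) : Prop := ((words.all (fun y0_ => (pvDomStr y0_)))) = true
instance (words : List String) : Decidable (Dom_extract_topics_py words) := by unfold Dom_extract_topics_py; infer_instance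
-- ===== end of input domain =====

-- B replaces A's per-topic scan of keyword lists against a lowered word-set by a flat inverted
-- keyword->topic table, one pass over the words collecting hit topics in a set, and a filter
-- of the fixed topic order; same return value, no speed claim.

-- ===== PORT A =====
def pvTopicKeywordsA : List (String × List String) :=
  [("technology", ["ai", "computer", "software", "digital", "system", "algorithm"]),
   ("science", ["research", "study", "analysis", "experiment", "data", "theory"]),
   ("emotion", ["feel", "emotion", "happy", "sad", "angry", "love", "hate"]),
   ("communication", ["speak", "talk", "say", "tell", "communicate", "discuss"])]

def extract_topics_py (words : List String) : List String :=
  let word_set : PySem.Set String := PySem.Set.ofList (words.map PySem.Str.lower)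
  pvTopicKeywordsA.foldl
    (fun detected tk =>
      if tk.2.any (fun keyword => PySem.Set.contains word_set keyword) then detected ++ [tk.1]
      else detected) []

-- ===== PORT B =====
def pvKeywordTopic : PySem.Dict String String := PySem.Dict.mk
  [("ai", "technology"), ("computer", "technology"), ("software", "technology"),
   ("digital", "technology"), ("system", "technology"), ("algorithm", "technology"),
   ("research", "science"), ("study", "science"), ("analysis", "science"),
   ("experiment", "science"), ("data", "science"), ("theory", "science"),
   ("feel", "emotion"), ("emotion", "emotion"), ("happy", "emotion"),
   ("sad", "emotion"), ("angry", "emotion"), ("love", "emotion"), ("hate", "emotion"),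
   ("speak", "communication"), ("talk", "communication"), ("say", "communication"),
   ("tell", "communication"), ("communicate", "communication"), ("discuss", "communication")]

def pvTopicOrder : List String := ["technology", "science", "emotion", "communication"]

def extract_topics_py_alt (words : List String) : List String :=
  let detected : PySem.Set String :=
    words.foldl
      (fun s word =>
        match pvKeywordTopic.get? (PySem.Str.lower word) with
        | some topic => PySem.Set.add s topic
        | none => s) PySem.Set.empty
  pvTopicOrder.filter (fun t => PySem.Set.contains detected t)

-- ===== PRECONDITION & SPEC =====
def Spec_extract_topics_py (words : List String) (out : List String) : Prop := out = extract_topics_py_alt words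
instance (words : List String) (out : List String) : Decidable (Spec_extract_topics_py words out) := by unfold Spec_extract_topics_py; infer_instance

-- ===== CLAIM (what is proved, stated in full; the proofs are below) =====
def Claim_equal_extract_topics_py : Prop := ∀ (words : List String), Dom_extract_topics_py words → Spec_extract_topics_py words (extract_topics_py words)

-- ===== LEMMAS AND PROOFS =====

-- A's per-topic condition, re-expressed as a scan over the words.
theorem pv_condA (kws words : List String) :
    (kws.any fun k => PySem.Set.contains (PySem.Set.ofList (words.map PySem.Str.lower)) k)
      = words.any (fun w => kws.contains (PySem.Str.lower w)) := by
  apply Bool.eq_iff_iff.mpr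
  simp [List.any_eq_true, PySem.Set.contains, PySem.Set.mem_ofList, List.mem_map]
  tauto

-- Membership in B's 'detected' set accumulated by the word loop.
theorem pv_condB (words : List String) (s : PySem.Set String) (t : String) :
    PySem.Set.contains
      (words.foldl (fun s word =>
        match pvKeywordTopic.get? (PySem.Str.lower word) with
        | some topic => PySem.Set.add s topic
        | none => s) s) t
    = (PySem.Set.contains s t || words.any (fun w => pvKeywordTopic.get? (PySem.Str.lower w) == some t)) := by
  induction words generalizing s with
  | nil => simp
  | cons w ws ih =>
    simp only [List.foldl_cons, List.any_cons]
    cases h : pvKeywordTopic.get? (PySem.Str.lower w) with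
    | none => rw [ih]; simp
    | some u =>
      rw [ih]
      apply Bool.eq_iff_iff.mpr
      simp [PySem.Set.contains, PySem.Set.mem_add]
      tauto

-- A key hits topic t in an assoc-list dict with distinct keys iff some pair (k, t) is in the list.
theorem pv_any_key_false (l : List (String × String)) (k t : String)
    (hk : k ∉ l.map (fun p => p.1)) :
    (l.any fun p => p.1 == k && p.2 == t) = false := by
  simp only [List.any_eq_false]
  intro p hp
  simp only [Bool.and_eq_true, beq_iff_eq, not_and]
  intro h1 _
  exact hk (List.mem_map.mpr ⟨p, hp, h1⟩)

theorem pv_get?_mk_beq_some (l : List (String × String)) (k t : String)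
    (hnd : (l.map (fun p => p.1)).Nodup) :
    ((PySem.Dict.mk l).get? k == some t) = (l.any fun p => p.1 == k && p.2 == t) := by
  induction l with
  | nil => simp [PySem.Dict.get?]
  | cons a rest ih =>
    rw [List.map_cons, List.nodup_cons] at hnd
    rw [PySem.Dict.get?_mk_cons, List.any_cons]
    cases hak : a.1 == k with
    | true =>
      have hk : k ∉ rest.map (fun p => p.1) := by
        rw [← (beq_iff_eq.mp hak)]; exact hnd.1
      rw [pv_any_key_false rest k t hk]
      cases hbt : a.2 == t <;> simp [hbt]
    | false => simp [ih hnd.2]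

theorem pv_hit_technology (k : String) :
    (pvKeywordTopic.get? k == some "technology")
      = (["ai", "computer", "software", "digital", "system", "algorithm"] : List String).contains k := by
  rw [pvKeywordTopic, pv_get?_mk_beq_some _ _ _ (by decide)]
  apply Bool.eq_iff_iff.mpr
  simp only [List.any_eq_true, List.contains_eq_mem, decide_eq_true_eq]
  simp
  tauto

theorem pv_hit_science (k : String) :
    (pvKeywordTopic.get? k == some "science")
      = (["research", "study", "analysis", "experiment", "data", "theory"] : List String).contains k := by
  rw [pvKeywordTopic, pv_get?_mk_beq_some _ _ _ (by decide)]
  apply Bool.eq_iff_iff.mpr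
  simp only [List.any_eq_true, List.contains_eq_mem, decide_eq_true_eq]
  simp
  tauto

theorem pv_hit_emotion (k : String) :
    (pvKeywordTopic.get? k == some "emotion")
      = (["feel", "emotion", "happy", "sad", "angry", "love", "hate"] : List String).contains k := by
  rw [pvKeywordTopic, pv_get?_mk_beq_some _ _ _ (by decide)]
  apply Bool.eq_iff_iff.mpr
  simp only [List.any_eq_true, List.contains_eq_mem, decide_eq_true_eq]
  simp
  tauto

theorem pv_hit_communication (k : String) :
    (pvKeywordTopic.get? k == some "communication")
      = (["speak", "talk", "say", "tell", "communicate", "discuss"] : List String).contains k := by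
  rw [pvKeywordTopic, pv_get?_mk_beq_some _ _ _ (by decide)]
  apply Bool.eq_iff_iff.mpr
  simp only [List.any_eq_true, List.contains_eq_mem, decide_eq_true_eq]
  simp
  tauto

-- ===== VERDICT (by name: the statement is the Claim_ definition above) =====
theorem pv_contains_empty (t : String) :
    PySem.Set.contains (PySem.Set.empty : PySem.Set String) t = false := rfl

theorem extract_topics_py_spec : Claim_equal_extract_topics_py := by
  intro words _
  unfold Spec_extract_topics_py extract_topics_py extract_topics_py_alt
  simp only [pvTopicKeywordsA, pvTopicOrder, List.foldl_cons, List.foldl_nil,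
    List.filter_cons, List.filter_nil, pv_condB, pv_condA,
    pv_hit_technology, pv_hit_science, pv_hit_emotion, pv_hit_communication,
    pv_contains_empty, Bool.false_or]
  split_ifs <;> rfl
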